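-- pv_equiv track=rewrite | github.com/Aaquib07/Coding-Solutions | Sorting/Process_Execution/main.py | processExecution
-- ===== SOURCE A (Python) =====
-- from typing import List
-- from bisect import bisect_left, bisect_right
--
-- def processExecution(power: List[int], minPower: List[int], maxPower: List[int]):
--     result = []
--     # Sort the power list
--     sorted_power = sorted(power)
--     n = len(sorted_power)
--
--     # Precompute the prefix sum of powers of processes
--     power_sum = [0] * (n + 1)
--     for i in range(n):
--         power_sum[i + 1] = power_sum[i] + sorted_power[i]
--
--     # Iterate through each processor's power range
--     for min_p, max_p in zip(minPower, maxPower):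
--         # Find the leftmost index of the valid processes
--         left_index = bisect_left(sorted_power, min_p)
--
--         # Find the rightmost index of the valid processes
--         right_index = bisect_right(sorted_power, max_p)
--
--         # Number of valid processes
--         count = right_index - left_index
--         # Total power of valid processes
--         total_power = power_sum[right_index] - power_sum[left_index]
--         # Add the count of valid processes and their power sum to our result
--         result.append([count, total_power])
--
--     return result
-- ===== SOURCE B (Python) =====
-- from typing import List
--
-- def processExecution(power: List[int], minPower: List[int], maxPower: List[int]):
--     # Answer each query by one direct scan of the unsorted power list:
--     # count/sum of elements <= max minus count/sum of elements < min.
--     def scan(mn, mx):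
--         c_le = 0
--         s_le = 0
--         c_lt = 0
--         s_lt = 0
--         for x in power:
--             if x <= mx:
--                 c_le += 1
--                 s_le += x
--             if x < mn:
--                 c_lt += 1
--                 s_lt += x
--         return [c_le - c_lt, s_le - s_lt]
--     return [scan(mn, mx) for mn, mx in zip(minPower, maxPower)]
-- ===== Notes on version B (the rewrite author's own statement) =====
-- stated objective: simpler
-- what changed: Each query is answered by a single direct linear scan of the unsorted power list (count/sum of elements <= max minus count/sum of elements < min), removing the sort, the prefix-sum table and both binary searches.
import Mathlib
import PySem

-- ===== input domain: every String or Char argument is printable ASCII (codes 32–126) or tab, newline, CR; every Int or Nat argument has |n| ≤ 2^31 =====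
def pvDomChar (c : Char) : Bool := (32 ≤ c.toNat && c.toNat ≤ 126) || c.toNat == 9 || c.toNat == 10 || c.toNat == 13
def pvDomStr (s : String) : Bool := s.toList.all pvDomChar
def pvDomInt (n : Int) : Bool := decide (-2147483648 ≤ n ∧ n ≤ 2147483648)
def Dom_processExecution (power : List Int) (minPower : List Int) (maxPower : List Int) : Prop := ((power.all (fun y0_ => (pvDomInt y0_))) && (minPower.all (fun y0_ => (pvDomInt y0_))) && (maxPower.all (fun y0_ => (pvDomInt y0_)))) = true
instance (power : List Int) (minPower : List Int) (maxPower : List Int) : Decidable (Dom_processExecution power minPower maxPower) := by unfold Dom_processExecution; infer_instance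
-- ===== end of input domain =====

-- B replaces A's sort + prefix sums + binary searches by one plain scan of the
-- unsorted list per query (count/sum of elements ≤ max minus those < min): simpler, not faster.

-- ===== PORT A =====
def processExecution (power : List Int) (minPower : List Int) (maxPower : List Int) : List (List Int) :=
  let sorted_power := PySem.List.sorted power (fun x => x) false
  let n := sorted_power.length
  let power_sum := (List.range n).foldl
    (fun acc i => acc.set (i + 1) (acc.getD i 0 + sorted_power.getD i 0))
    (List.replicate (n + 1) 0)
  (minPower.zip maxPower).foldl (fun result q =>
    let left_index := PySem.List.bisectLeft sorted_power q.1
    let right_index := PySem.List.bisectRight sorted_power q.2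
    result ++ [[(right_index : Int) - (left_index : Int),
                power_sum.getD right_index 0 - power_sum.getD left_index 0]]) []

-- ===== PORT B =====
def peScan (power : List Int) (mn mx : Int) : List Int :=
  let r := power.foldl (fun (st : Int × Int × Int × Int) x =>
      let st := if x ≤ mx then (st.1 + 1, st.2.1 + x, st.2.2.1, st.2.2.2) else st
      if x < mn then (st.1, st.2.1, st.2.2.1 + 1, st.2.2.2 + x) else st)
    (0, 0, 0, 0)
  [r.1 - r.2.2.1, r.2.1 - r.2.2.2]

def processExecution_alt (power : List Int) (minPower : List Int) (maxPower : List Int) : List (List Int) :=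
  (minPower.zip maxPower).map (fun q => peScan power q.1 q.2)

-- ===== PRECONDITION & SPEC =====
def Spec_processExecution (power : List Int) (minPower : List Int) (maxPower : List Int) (out : List (List Int)) : Prop := out = processExecution_alt power minPower maxPower
instance (power : List Int) (minPower : List Int) (maxPower : List Int) (out : List (List Int)) : Decidable (Spec_processExecution power minPower maxPower out) := by unfold Spec_processExecution; infer_instance

-- ===== CLAIM (what is proved, stated in full; the proofs are below) =====
def Claim_equal_processExecution : Prop := ∀ (power : List Int) (minPower : List Int) (maxPower : List Int), Dom_processExecution power minPower maxPower → Spec_processExecution power minPower maxPower (processExecution power minPower maxPower)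

-- ===== LEMMAS AND PROOFS =====

-- For a downward-closed predicate, a sorted list's first countP elements are exactly its filter.
theorem take_countP_eq_filter (p : Int → Bool) (hp : ∀ a b : Int, a ≤ b → p b = true → p a = true) :
    ∀ s : List Int, s.Pairwise (· ≤ ·) → s.take (s.countP p) = s.filter p := by
  intro s hs
  induction s with
  | nil => simp
  | cons x t ih =>
    rcases List.pairwise_cons.mp hs with ⟨hx, ht⟩
    by_cases hpx : p x = true
    · simp [hpx, ih ht]
    · have h0 : t.countP p = 0 := by
        apply List.countP_eq_zero.mpr
        intro y hy hpy
        exact hpx (hp x y (hx y hy) hpy)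
      have hf : t.filter p = [] := List.filter_eq_nil_iff.mpr
        (fun y hy hpy => hpx (hp x y (hx y hy) hpy))
      simp [hpx, h0, hf]

-- A number k that splits a list into a prefix satisfying p and a suffix refuting p is countP p.
theorem countP_eq_of_split (p : Int → Bool) (s : List Int) (k : ℕ) (hk : k ≤ s.length)
    (h1 : ∀ j (hj : j < s.length), j < k → p s[j] = true)
    (h2 : ∀ j (hj : j < s.length), k ≤ j → ¬ p s[j] = true) :
    s.countP p = k := by
  have hsplit : s = s.take k ++ s.drop k := (List.take_append_drop k s).symm
  have htake : (s.take k).countP p = (s.take k).length := by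
    apply List.countP_eq_length.mpr
    intro a ha
    rcases List.mem_iff_getElem.mp ha with ⟨j, hj, rfl⟩
    have hjl : j < s.length := lt_of_lt_of_le hj (by simp)
    have hjk : j < k := by
      have h := hj; rw [List.length_take] at h; omega
    have := h1 j hjl hjk
    simpa [List.getElem_take] using this
  have hdrop : (s.drop k).countP p = 0 := by
    apply List.countP_eq_zero.mpr
    intro a ha hpa
    rcases List.mem_iff_getElem.mp ha with ⟨j, hj, rfl⟩
    have hjl : k + j < s.length := by
      have h := hj; rw [List.length_drop] at h; omega
    have := h2 (k + j) hjl (Nat.le_add_right k j)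
    exact this (by simpa [List.getElem_drop] using hpa)
  calc s.countP p = (s.take k ++ s.drop k).countP p := by rw [← hsplit]
    _ = (s.take k).countP p + (s.drop k).countP p := List.countP_append ..
    _ = k := by rw [htake, hdrop]; simpa using hk

theorem bisectLeft_eq_countP (s : List Int) (x : Int) (hs : s.Pairwise (· ≤ ·)) :
    s.countP (fun a => decide (a < x)) = PySem.List.bisectLeft s x := by
  obtain ⟨hle, h1, h2⟩ := PySem.List.bisectLeft_spec s x hs
  exact countP_eq_of_split _ s _ hle
    (fun j hj hjk => by simpa using h1 j hj hjk)
    (fun j hj hkj => by simpa using not_lt.mpr (h2 j hj hkj))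

theorem bisectRight_eq_countP (s : List Int) (x : Int) (hs : s.Pairwise (· ≤ ·)) :
    s.countP (fun a => decide (a ≤ x)) = PySem.List.bisectRight s x := by
  obtain ⟨hle, h1, h2⟩ := PySem.List.bisectRight_spec s x hs
  exact countP_eq_of_split _ s _ hle
    (fun j hj hjk => by simpa using h1 j hj hjk)
    (fun j hj hkj => by simpa using not_le.mpr (h2 j hj hkj))

-- The prefix-sum loop of A: entry j holds the sum of the first j sorted elements.
theorem prefix_sum_inv (s : List Int) (m : ℕ) (hm : m ≤ s.length) :
    (((List.range m).foldl (fun acc i => acc.set (i + 1) (acc.getD i 0 + s.getD i 0))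
        (List.replicate (s.length + 1) 0)).length = s.length + 1) ∧
    (∀ j, j ≤ m →
      ((List.range m).foldl (fun acc i => acc.set (i + 1) (acc.getD i 0 + s.getD i 0))
        (List.replicate (s.length + 1) 0)).getD j 0 = (s.take j).sum) := by
  induction m with
  | zero =>
    refine ⟨by simp, ?_⟩
    intro j hj
    interval_cases j
    simp [List.getD]
  | succ m ih =>
    have hm' : m ≤ s.length := Nat.le_of_succ_le hm
    obtain ⟨hlen, hval⟩ := ih hm'
    set acc := (List.range m).foldl (fun acc i => acc.set (i + 1) (acc.getD i 0 + s.getD i 0))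
        (List.replicate (s.length + 1) 0) with hacc
    have hstep : (List.range (m + 1)).foldl
        (fun acc i => acc.set (i + 1) (acc.getD i 0 + s.getD i 0))
        (List.replicate (s.length + 1) 0)
        = acc.set (m + 1) (acc.getD m 0 + s.getD m 0) := by
      rw [List.range_succ, List.foldl_append, ← hacc]
      rfl
    rw [hstep]
    have hmlt : m < s.length := hm
    constructor
    · simpa using hlen
    · intro j hj
      have hsm : s.getD m 0 = s[m] := by
        simp [List.getD, List.getElem?_eq_getElem hmlt]
      by_cases hje : j = m + 1
      · subst hje
        have hjlen : m + 1 < acc.length := by omega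
        have : (acc.set (m + 1) (acc.getD m 0 + s.getD m 0)).getD (m + 1) 0
            = acc.getD m 0 + s.getD m 0 := by
          simp [List.getD, List.getElem?_set_self hjlen]
        rw [this, hval m (le_refl m), hsm]
        rw [List.take_add_one, List.sum_append]
        simp [List.getElem?_eq_getElem hmlt]
      · have hjm : j ≤ m := by omega
        have : (acc.set (m + 1) (acc.getD m 0 + s.getD m 0)).getD j 0 = acc.getD j 0 := by
          simp [List.getD, List.getElem?_set_ne (by omega : m + 1 ≠ j)]
        rw [this]
        exact hval j hjm

-- B's inner scan accumulates the four running count/sum values.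
theorem peScan_fold (mn mx : Int) :
    ∀ (l : List Int) (c1 s1 c2 s2 : Int),
      l.foldl (fun (st : Int × Int × Int × Int) x =>
          let st := if x ≤ mx then (st.1 + 1, st.2.1 + x, st.2.2.1, st.2.2.2) else st
          if x < mn then (st.1, st.2.1, st.2.2.1 + 1, st.2.2.2 + x) else st)
        (c1, s1, c2, s2)
      = (c1 + l.countP (fun a => decide (a ≤ mx)), s1 + (l.filter (fun a => decide (a ≤ mx))).sum,
         c2 + l.countP (fun a => decide (a < mn)), s2 + (l.filter (fun a => decide (a < mn))).sum) := by
  intro l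
  induction l with
  | nil => intro c1 s1 c2 s2; simp
  | cons x t ih =>
    intro c1 s1 c2 s2
    simp only [List.foldl_cons, List.countP_cons, List.filter_cons]
    by_cases h1 : x ≤ mx <;> by_cases h2 : x < mn <;>
      simp [h1, h2, ih, List.sum_cons] <;> (repeat' apply And.intro) <;> (first | trivial | ring)

-- The two per-query answers coincide.
theorem row_eq (power : List Int) (mn mx : Int) :
    (let sorted_power := PySem.List.sorted power (fun x => x) false
     let n := sorted_power.length
     let power_sum := (List.range n).foldl
       (fun acc i => acc.set (i + 1) (acc.getD i 0 + sorted_power.getD i 0))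
       (List.replicate (n + 1) 0)
     [((PySem.List.bisectRight sorted_power mx : Int) - (PySem.List.bisectLeft sorted_power mn : Int)),
      power_sum.getD (PySem.List.bisectRight sorted_power mx) 0
        - power_sum.getD (PySem.List.bisectLeft sorted_power mn) 0])
    = peScan power mn mx := by
  set s := PySem.List.sorted power (fun x => x) false with hs
  have hpair : s.Pairwise (· ≤ ·) := by
    simpa using PySem.List.sorted_pairwise power (fun x => x)
  have hperm : s.Perm power := PySem.List.sorted_perm power (fun x => x) false
  have hL := (bisectLeft_eq_countP s mn hpair).symm
  have hR := (bisectRight_eq_countP s mx hpair).symm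
  have hLle : PySem.List.bisectLeft s mn ≤ s.length :=
    (PySem.List.bisectLeft_spec s mn hpair).1
  have hRle : PySem.List.bisectRight s mx ≤ s.length :=
    (PySem.List.bisectRight_spec s mx hpair).1
  obtain ⟨_, hval⟩ := prefix_sum_inv s s.length (le_refl _)
  have hpsL := hval _ hLle
  have hpsR := hval _ hRle
  have hdownLe : ∀ a b : Int, a ≤ b → decide (b ≤ mx) = true → decide (a ≤ mx) = true := by
    intro a b hab h; simp at h ⊢; omega
  have hdownLt : ∀ a b : Int, a ≤ b → decide (b < mn) = true → decide (a < mn) = true := by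
    intro a b hab h; simp at h ⊢; omega
  have htfL : s.take (s.countP (fun a => decide (a < mn))) = s.filter (fun a => decide (a < mn)) :=
    take_countP_eq_filter _ hdownLt s hpair
  have htfR : s.take (s.countP (fun a => decide (a ≤ mx))) = s.filter (fun a => decide (a ≤ mx)) :=
    take_countP_eq_filter _ hdownLe s hpair
  simp only [peScan, peScan_fold mn mx power 0 0 0 0]
  have hcL : s.countP (fun a => decide (a < mn)) = power.countP (fun a => decide (a < mn)) :=
    hperm.countP_eq _
  have hcR : s.countP (fun a => decide (a ≤ mx)) = power.countP (fun a => decide (a ≤ mx)) :=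
    hperm.countP_eq _
  have hsL : (s.filter (fun a => decide (a < mn))).sum = (power.filter (fun a => decide (a < mn))).sum :=
    (hperm.filter _).sum_eq
  have hsR : (s.filter (fun a => decide (a ≤ mx))).sum = (power.filter (fun a => decide (a ≤ mx))).sum :=
    (hperm.filter _).sum_eq
  rw [hpsL, hpsR, hL, hR, htfL, htfR, hcL, hcR, hsL, hsR]
  simp

-- result.append in a loop is a map.
theorem foldl_append_map {α β : Type} (f : α → β) :
    ∀ (l : List α) (acc : List β),
      l.foldl (fun r q => r ++ [f q]) acc = acc ++ l.map f := by
  intro l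
  induction l with
  | nil => intro acc; simp
  | cons x t ih => intro acc; simp [ih]

-- ===== VERDICT (by name: the statement is the Claim_ definition above) =====
theorem processExecution_spec : Claim_equal_processExecution := by
  intro power minPower maxPower _
  unfold Spec_processExecution processExecution processExecution_alt
  simp only []
  rw [foldl_append_map (fun q : Int × Int =>
    [((PySem.List.bisectRight (PySem.List.sorted power (fun x => x) false) q.2 : Int)
        - (PySem.List.bisectLeft (PySem.List.sorted power (fun x => x) false) q.1 : Int)),
      ((List.range (PySem.List.sorted power (fun x => x) false).length).foldl
        (fun acc i => acc.set (i + 1)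
          (acc.getD i 0 + (PySem.List.sorted power (fun x => x) false).getD i 0))
        (List.replicate ((PySem.List.sorted power (fun x => x) false).length + 1) 0)).getD
        (PySem.List.bisectRight (PySem.List.sorted power (fun x => x) false) q.2) 0
      - ((List.range (PySem.List.sorted power (fun x => x) false).length).foldl
        (fun acc i => acc.set (i + 1)
          (acc.getD i 0 + (PySem.List.sorted power (fun x => x) false).getD i 0))
        (List.replicate ((PySem.List.sorted power (fun x => x) false).length + 1) 0)).getD
        (PySem.List.bisectLeft (PySem.List.sorted power (fun x => x) false) q.1) 0])]
  try simp only [List.nil_append]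
  apply List.map_congr_left
  intro q _
  exact row_eq power q.1 q.2
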